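-- pv_equiv track=rewrite | github.com/karo-pajdak/fasta-fastq-parser | stats.py | calculate_length_distributions
-- ===== SOURCE A (Python) =====
-- from typing import List, Optional, Dict, Union
--
-- def calculate_length_distributions(lengths: List[int], bin_size: int) -> Optional[Dict[int,int]]:
--     """Takes a list of sequence lengths and groups them into bins of size bin_size."""
--     if not lengths:
--         return None
--     distribution = {}
--     for length in lengths:
--         bin = (length // bin_size) * bin_size
--         distribution[bin] = distribution.get(bin, 0) + 1
--     return dict(sorted(distribution.items()))
-- ===== SOURCE B (Python) =====
-- from typing import List, Optional, Dict
--
-- def calculate_length_distributions(lengths: List[int], bin_size: int) -> Optional[Dict[int,int]]: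
--     """Takes a list of sequence lengths and groups them into bins of size bin_size."""
--     if not lengths:
--         return None
--     bins = sorted(length // bin_size * bin_size for length in lengths)
--     result = {}
--     i, n = 0, len(bins)
--     while i < n:
--         j = i + 1
--         while j < n and bins[j] == bins[i]:
--             j += 1
--         result[bins[i]] = j - i
--         i = j
--     return result
-- ===== Notes on version B (the rewrite author's own statement) =====
-- stated objective: alternative
-- what changed: Replaces A's hash-accumulate-into-a-dict-then-sort-the-items with: map every length to its bin key, sort the bin keys, and run-length-encode the sorted key stream in one pass, emitting the result dict directly in ascending bin order.
import Mathlib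
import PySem

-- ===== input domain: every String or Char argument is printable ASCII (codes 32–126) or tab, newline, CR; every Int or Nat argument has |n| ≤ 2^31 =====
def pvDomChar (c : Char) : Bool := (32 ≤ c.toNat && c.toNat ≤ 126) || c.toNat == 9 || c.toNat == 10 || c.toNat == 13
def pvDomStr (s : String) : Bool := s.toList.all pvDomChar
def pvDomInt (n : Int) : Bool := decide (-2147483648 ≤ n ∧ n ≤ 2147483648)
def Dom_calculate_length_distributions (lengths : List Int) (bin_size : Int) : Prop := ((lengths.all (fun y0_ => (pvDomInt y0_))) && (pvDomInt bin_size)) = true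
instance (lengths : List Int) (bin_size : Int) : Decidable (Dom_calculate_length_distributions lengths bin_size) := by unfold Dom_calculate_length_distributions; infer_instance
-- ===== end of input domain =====

-- B replaces A's dict-accumulate-then-sort-items with sort-the-bin-keys-then-run-length-encode; same results, no speed claim.

-- ===== PORT A =====
def calculate_length_distributions (lengths : List Int) (bin_size : Int) : Option (List (Int × Int)) :=
  match lengths with
  | [] => none
  | _ :: _ =>
    -- for length in lengths: distribution[bin] = distribution.get(bin, 0) + 1
    let distribution : PySem.Dict Int Int :=
      lengths.foldl (fun d length =>
        let bin := (PySem.Int.floordiv length bin_size) * bin_size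
        d.insert bin (d.getD bin 0 + 1)) PySem.Dict.empty
    -- dict(sorted(distribution.items())): tuples compare lexicographically
    some (PySem.List.sorted2 distribution.items (fun p => p.1) (fun p => p.2))

-- ===== PORT B =====
-- the outer while loop of Source B: emit (bins[i], j - i) for each maximal run of equal keys, advance i to j
def pvRuns (l : List Int) : List (Int × Int) :=
  match l with
  | [] => []
  | x :: xs =>
    (x, 1 + ((xs.takeWhile (fun y => y == x)).length : Int)) :: pvRuns (xs.dropWhile (fun y => y == x))
termination_by l.length
decreasing_by simpa using Nat.lt_succ_of_le (List.length_dropWhile_le _ _)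

def calculate_length_distributions_alt (lengths : List Int) (bin_size : Int) : Option (List (Int × Int)) :=
  match lengths with
  | [] => none
  | _ :: _ =>
    let bins := PySem.List.sorted (lengths.map (fun length => (PySem.Int.floordiv length bin_size) * bin_size)) (fun x => x) false
    some (pvRuns bins)

-- ===== PRECONDITION & SPEC =====
-- Pre_ excludes exactly the inputs where Python A raises ZeroDivisionError: bin_size == 0 with a non-empty list.
def Pre_calculate_length_distributions (lengths : List Int) (bin_size : Int) : Prop :=
  bin_size ≠ 0 ∨ lengths = []
instance (lengths : List Int) (bin_size : Int) : Decidable (Pre_calculate_length_distributions lengths bin_size) := by unfold Pre_calculate_length_distributions; infer_instance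
def pvWitness_calculate_length_distributions : List Int × Int := ([3, 12, 5, 9, -1], 5)

def Spec_calculate_length_distributions (lengths : List Int) (bin_size : Int) (out : Option (List (Int × Int))) : Prop := out = calculate_length_distributions_alt lengths bin_size
instance (lengths : List Int) (bin_size : Int) (out : Option (List (Int × Int))) : Decidable (Spec_calculate_length_distributions lengths bin_size out) := by unfold Spec_calculate_length_distributions; infer_instance

-- ===== CLAIM (what is proved, stated in full; the proofs are below) =====
def Claim_equal_calculate_length_distributions : Prop := ∀ (lengths : List Int) (bin_size : Int), Dom_calculate_length_distributions lengths bin_size → Pre_calculate_length_distributions lengths bin_size → Spec_calculate_length_distributions lengths bin_size (calculate_length_distributions lengths bin_size)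

-- ===== LEMMAS AND PROOFS =====

-- insertBy only looks at `before x b` for b in the list
theorem pv_insertBy_congr {α : Type} (p q : α → α → Bool) (x : α) (ys : List α)
    (h : ∀ b ∈ ys, p x b = q x b) :
    PySem.List.insertBy p x ys = PySem.List.insertBy q x ys := by
  induction ys with
  | nil => rfl
  | cons y ys ih =>
    simp only [PySem.List.insertBy]
    rw [h y (by simp)]
    split_ifs with hb
    · rfl
    · simp only [List.cons.injEq, true_and]
      exact ih (fun b hb => h b (by simp [hb]))

theorem pv_foldl_insertBy_congr {α : Type} (p q : α → α → Bool) (xs acc : List α)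
    (h : ∀ a, ∀ b, (a ∈ xs ∨ a ∈ acc) → (b ∈ xs ∨ b ∈ acc) → p a b = q a b) :
    xs.foldl (fun acc x => PySem.List.insertBy p x acc) acc
      = xs.foldl (fun acc x => PySem.List.insertBy q x acc) acc := by
  induction xs generalizing acc with
  | nil => rfl
  | cons x xs ih =>
    simp only [List.foldl_cons]
    rw [pv_insertBy_congr p q x acc
      (fun b hb => h x b (Or.inl (by simp)) (Or.inr hb))]
    exact ih _ (fun a b ha hb => by
      rcases ha with ha | ha
      · rcases hb with hb | hb
        · exact h a b (Or.inl (by simp [ha])) (Or.inl (by simp [hb]))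
        · rcases (PySem.List.mem_insertBy _ _ _ _).1 hb with hb | hb
          · exact h a b (Or.inl (by simp [ha])) (Or.inl (by simp [hb]))
          · exact h a b (Or.inl (by simp [ha])) (Or.inr hb)
      · rcases (PySem.List.mem_insertBy _ _ _ _).1 ha with ha | ha
        · rcases hb with hb | hb
          · exact h a b (Or.inl (by simp [ha])) (Or.inl (by simp [hb]))
          · rcases (PySem.List.mem_insertBy _ _ _ _).1 hb with hb | hb
            · exact h a b (Or.inl (by simp [ha])) (Or.inl (by simp [hb]))
            · exact h a b (Or.inl (by simp [ha])) (Or.inr hb)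
        · rcases hb with hb | hb
          · exact h a b (Or.inr ha) (Or.inl (by simp [hb]))
          · rcases (PySem.List.mem_insertBy _ _ _ _).1 hb with hb | hb
            · exact h a b (Or.inr ha) (Or.inl (by simp [hb]))
            · exact h a b (Or.inr ha) (Or.inr hb))

-- on a list of pairs whose members are determined by their first component,
-- lexicographic tuple sort coincides with sort by first component
theorem pv_sorted2_eq_sorted_fst (xs : List (Int × Int))
    (hdet : ∀ a ∈ xs, ∀ b ∈ xs, a.1 = b.1 → a.2 = b.2) :
    PySem.List.sorted2 xs (fun p => p.1) (fun p => p.2)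
      = PySem.List.sorted xs (fun p => p.1) := by
  rw [PySem.List.sorted_eq_foldl_insertBy]
  show List.foldl _ [] xs = _
  apply pv_foldl_insertBy_congr
  intro a b ha hb
  have ha := ha.resolve_right (by simp)
  have hb := hb.resolve_right (by simp)
  by_cases h1 : a.1 = b.1
  · have h2 : a.2 = b.2 := hdet a ha b hb h1
    simp [h1, h2]
  · rcases lt_or_gt_of_ne h1 with hlt | hgt
    · simp [hlt, not_lt_of_gt hlt]
    · simp [hgt, not_lt_of_gt hgt]

-- elements remaining after dropping the leading run of x are strictly greater than x
theorem pv_mem_dropWhile_lt (x : Int) (xs : List Int)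
    (hxs : xs.Pairwise (· ≤ ·)) (hxle : ∀ y ∈ xs, x ≤ y) :
    ∀ y ∈ xs.dropWhile (fun y => y == x), x < y := by
  intro y hy
  rcases hde : xs.dropWhile (fun y => y == x) with _ | ⟨h0, d⟩
  · simp [hde] at hy
  · have hh0 : ¬ (h0 == x) = true := by
      have := List.head?_dropWhile_not (fun y => y == x) xs
      rw [hde] at this; simpa using this
    have hh0m : h0 ∈ xs := (List.dropWhile_sublist _).subset (by rw [hde]; exact List.mem_cons_self)
    have hh0x : x < h0 := by
      rcases lt_or_eq_of_le (hxle h0 hh0m) with h | h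
      · exact h
      · exact absurd (by simp [h.symm]) hh0
    have hdp : (xs.dropWhile (fun y => y == x)).Pairwise (· ≤ ·) :=
      List.Pairwise.sublist (List.dropWhile_sublist _) hxs
    rw [hde] at hy hdp
    rcases List.mem_cons.1 hy with rfl | hy
    · exact hh0x
    · exact lt_of_lt_of_le hh0x ((List.pairwise_cons.1 hdp).1 y hy)

-- characterisation of pvRuns on a ≤-sorted list: its members are exactly (key, count)
theorem pv_mem_pvRuns {l : List Int} (hs : l.Pairwise (· ≤ ·)) (p : Int × Int) :
    p ∈ pvRuns l ↔ p.1 ∈ l ∧ p.2 = (l.count p.1 : Int) := by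
  induction l using pvRuns.induct with
  | case1 => simp [pvRuns]
  | case2 x xs ih =>
    have hxs : xs.Pairwise (· ≤ ·) := (List.pairwise_cons.1 hs).2
    have hxle : ∀ y ∈ xs, x ≤ y := (List.pairwise_cons.1 hs).1
    have hsplit : xs.takeWhile (fun y => y == x) ++ xs.dropWhile (fun y => y == x) = xs :=
      List.takeWhile_append_dropWhile
    have ht : ∀ y ∈ xs.takeWhile (fun y => y == x), y = x := by
      intro y hy
      simpa using List.mem_takeWhile_imp hy
    have hd : ∀ y ∈ xs.dropWhile (fun y => y == x), x < y :=
      pv_mem_dropWhile_lt x xs hxs hxle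
    have hds : (xs.dropWhile (fun y => y == x)).Pairwise (· ≤ ·) :=
      List.Pairwise.sublist (List.dropWhile_sublist _) hxs
    have hcount : ∀ k : Int, (x :: xs).count k =
        (if k = x then 1 + (xs.takeWhile (fun y => y == x)).length else 0)
          + (xs.dropWhile (fun y => y == x)).count k := by
      intro k
      rw [List.count_cons, ← hsplit, List.count_append]
      by_cases hk : k = x
      · subst hk
        have h1 : (xs.takeWhile (fun y => y == k)).count k
            = (xs.takeWhile (fun y => y == k)).length := by
          apply List.count_eq_length.2
          intro y hy; exact (by simp [ht y hy] : k = y)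
        have h2 : (xs.dropWhile (fun y => y == k)).count k = 0 := by
          apply List.count_eq_zero.2
          intro hmem; exact lt_irrefl k (hd k hmem)
        simp [h1, h2]; omega
      · have h1 : (xs.takeWhile (fun y => y == x)).count k = 0 := by
          apply List.count_eq_zero.2
          intro hmem; exact hk (ht k hmem)
        simp [h1, hk]
        exact fun h => hk h.symm
    rw [pvRuns]
    simp only [List.mem_cons]
    constructor
    · rintro (rfl | hp)
      · refine ⟨by simp, ?_⟩
        simp only [hcount x, List.count_eq_zero.2 (fun hmem => lt_irrefl x (hd x hmem))]
        push_cast; ring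
      · obtain ⟨hm, hc⟩ := (ih hds).1 hp
        have hx : x < p.1 := hd _ hm
        refine ⟨Or.inr (by rw [← hsplit]; exact List.mem_append_right _ hm), ?_⟩
        rw [hcount p.1, if_neg (ne_of_gt hx)]
        simpa using hc
    · rintro ⟨hm, hc⟩
      by_cases hk : p.1 = x
      · left
        have : p.2 = 1 + ((xs.takeWhile (fun y => y == x)).length : Int) := by
          rw [hc, hcount p.1, hk, if_pos rfl,
            List.count_eq_zero.2 (fun hmem => lt_irrefl x (hd x hmem))]
          push_cast; ring
        exact Prod.ext_iff.2 ⟨hk, this⟩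
      · right
        apply (ih hds).2
        have hmx : p.1 ∈ xs := by
          rcases hm with h | h
          · exact absurd h hk
          · exact h
        have hmd : p.1 ∈ xs.dropWhile (fun y => y == x) := by
          rw [← hsplit] at hmx
          rcases List.mem_append.1 hmx with h | h
          · exact absurd (ht _ h) hk
          · exact h
        refine ⟨hmd, ?_⟩
        rw [hc, hcount p.1, if_neg hk]
        simp

-- pvRuns of a ≤-sorted list has strictly increasing keys
theorem pv_pvRuns_pairwise {l : List Int} (hs : l.Pairwise (· ≤ ·)) :
    (pvRuns l).Pairwise (fun p q => p.1 < q.1) := by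
  induction l using pvRuns.induct with
  | case1 => simp [pvRuns]
  | case2 x xs ih =>
    have hxs : xs.Pairwise (· ≤ ·) := (List.pairwise_cons.1 hs).2
    have hxle : ∀ y ∈ xs, x ≤ y := (List.pairwise_cons.1 hs).1
    have hds : (xs.dropWhile (fun y => y == x)).Pairwise (· ≤ ·) :=
      List.Pairwise.sublist (List.dropWhile_sublist _) hxs
    have hd : ∀ y ∈ xs.dropWhile (fun y => y == x), x < y :=
      pv_mem_dropWhile_lt x xs hxs hxle
    rw [pvRuns]
    apply List.pairwise_cons.2
    refine ⟨?_, ih hds⟩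
    intro q hq
    have := ((pv_mem_pvRuns hds q).1 hq).1
    exact hd _ this

-- main list-level equality between the two ports' payloads
theorem pv_main (keys : List Int) :
    PySem.List.sorted2
      (keys.foldl (fun d x => d.insert x (d.getD x 0 + 1)) PySem.Dict.empty).items
      (fun p => p.1) (fun p => p.2)
      = pvRuns (PySem.List.sorted keys (fun x => x) false) := by
  rw [PySem.Dict.foldl_insert_getD_add_one_eq_counter, PySem.Dict.items_counter]
  set L := PySem.List.sorted keys (fun x => x) false with hL
  have hperm : L.Perm keys := PySem.List.sorted_perm keys _ _
  have hLs : L.Pairwise (· ≤ ·) := by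
    simpa using PySem.List.sorted_pairwise keys (fun x => x)
  have hmemRuns : ∀ p : Int × Int, p ∈ pvRuns L ↔ p.1 ∈ keys ∧ p.2 = (keys.count p.1 : Int) := by
    intro p
    rw [pv_mem_pvRuns hLs]
    constructor
    · rintro ⟨hm, hc⟩
      exact ⟨hperm.mem_iff.1 hm, by rw [hc, hperm.count_eq]⟩
    · rintro ⟨hm, hc⟩
      exact ⟨hperm.mem_iff.2 hm, by rw [hc, hperm.count_eq]⟩
  set items := (PySem.Set.ofList keys).map (fun k => (k, (keys.count k : Int))) with hitems
  have hmemItems : ∀ p : Int × Int, p ∈ items ↔ p.1 ∈ keys ∧ p.2 = (keys.count p.1 : Int) := by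
    intro p
    simp only [hitems, List.mem_map]
    constructor
    · rintro ⟨k, hk, rfl⟩
      exact ⟨(PySem.Set.mem_ofList keys k).1 hk, rfl⟩
    · rintro ⟨hm, hc⟩
      exact ⟨p.1, (PySem.Set.mem_ofList keys p.1).2 hm, Prod.ext_iff.2 ⟨rfl, hc.symm⟩⟩
  have hdet : ∀ a ∈ items, ∀ b ∈ items, a.1 = b.1 → a.2 = b.2 := by
    intro a ha b hb h1
    rw [((hmemItems a).1 ha).2, ((hmemItems b).1 hb).2, h1]
  rw [pv_sorted2_eq_sorted_fst items hdet]
  apply PySem.List.sorted_eq_of_perm_of_pairwise_lt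
  · -- (pvRuns L).Perm items
    have hnd1 : (pvRuns L).Nodup := (pv_pvRuns_pairwise hLs).imp (fun h => by
      intro hEq; exact absurd (congrArg Prod.fst hEq) (ne_of_lt h))
    have hnd2 : items.Nodup := by
      apply List.Nodup.map
      · exact fun a b hab => congrArg Prod.fst hab
      · exact PySem.Set.nodup_ofList keys
    apply (List.perm_ext_iff_of_nodup hnd1 hnd2).2
    intro p
    rw [hmemRuns p, hmemItems p]
  · exact pv_pvRuns_pairwise hLs

-- ===== VERDICT (by name: the statement is the Claim_ definition above) =====
theorem calculate_length_distributions_spec : Claim_equal_calculate_length_distributions := by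
  intro lengths bin_size _ _
  show calculate_length_distributions lengths bin_size = calculate_length_distributions_alt lengths bin_size
  match lengths with
  | [] => rfl
  | x :: xs =>
    simp only [calculate_length_distributions, calculate_length_distributions_alt]
    have h := pv_main ((x :: xs).map (fun length => (PySem.Int.floordiv length bin_size) * bin_size))
    rw [List.foldl_map] at h
    exact congrArg some h
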